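-- pv_equiv track=rewrite | github.com/Bntajh/Exercices_Ptyhon | daemon/solution.py | daemon
-- ===== SOURCE A (Python) =====
-- from typing import List
--
-- def daemon(numbers: List[int], k: int) -> bool:
--     if not numbers or k < 0 or k >= len(numbers):
--         return False
--
--     pivot = numbers[k]
--
--
--     if all(x == pivot for x in numbers):
--         return True
--
--
--     max_avant_k = max((x for x in numbers[:k] if x < pivot), default=pivot)
--
--
--     min_apres_k = min((x for x in numbers[k+1:] if x > pivot), default=pivot)
--
--     return max_avant_k < pivot and min_apres_k >= pivot
-- ===== SOURCE B (Python) =====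
-- def daemon(numbers, k):
--     if not numbers or k < 0 or k >= len(numbers):
--         return False
--     pivot = numbers[k]
--     all_equal = True
--     exists_smaller = False
--     for i, x in enumerate(numbers):
--         if x != pivot:
--             all_equal = False
--         if i < k and x < pivot:
--             exists_smaller = True
--     return all_equal or exists_smaller
-- ===== Notes on version B (the rewrite author's own statement) =====
-- stated objective: simpler
-- what changed: Replaced the all-equal scan plus the two filtered max/min reductions over the prefix and suffix slices by one fused pass maintaining two Boolean flags (the suffix min condition is vacuously true, and the prefix max condition is just an existence test), returning all_equal or exists_smaller.
import Mathlib
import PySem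

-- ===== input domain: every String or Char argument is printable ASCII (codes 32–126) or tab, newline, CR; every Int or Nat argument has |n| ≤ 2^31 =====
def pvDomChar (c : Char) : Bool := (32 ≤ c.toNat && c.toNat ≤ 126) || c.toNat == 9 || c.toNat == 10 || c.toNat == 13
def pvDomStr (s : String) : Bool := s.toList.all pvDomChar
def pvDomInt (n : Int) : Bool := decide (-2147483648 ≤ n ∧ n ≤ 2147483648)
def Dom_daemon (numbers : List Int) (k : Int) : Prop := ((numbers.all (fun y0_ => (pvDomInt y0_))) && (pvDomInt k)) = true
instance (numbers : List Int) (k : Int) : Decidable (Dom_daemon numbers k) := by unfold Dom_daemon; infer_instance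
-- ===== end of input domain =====

-- B replaces A's all-equal scan + two filtered max/min slice reductions by one fused
-- flag-maintaining pass (objective: simpler); return value only, no mutation involved.

-- ===== PORT A =====
def daemon (numbers : List Int) (k : Int) : Bool :=
  if numbers = [] ∨ k < 0 ∨ (numbers.length : Int) ≤ k then false
  else
    match PySem.List.pyGet? numbers k with
    | none => false  -- unreachable: guard ensures k is in range
    | some pivot =>
      if numbers.all (fun x => x == pivot) then true
      else
        let maxAvant :=
          (PySem.List.max? ((PySem.List.slice numbers none (some k)).filter
            (fun x => decide (x < pivot))) (fun y => y)).getD pivot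
        let minApres :=
          (PySem.List.min? ((PySem.List.slice numbers (some (k+1)) none).filter
            (fun x => decide (pivot < x))) (fun y => y)).getD pivot
        decide (maxAvant < pivot) && decide (pivot ≤ minApres)

-- ===== PORT B =====
-- the loop body of Source B's single pass: state = (all_equal, exists_smaller)
def daemonStep (pivot k : Int) (st : Bool × Bool) (p : Int × Int) : Bool × Bool :=
  let st1 := if p.2 ≠ pivot then (false, st.2) else st
  if p.1 < k ∧ p.2 < pivot then (st1.1, true) else st1

def daemon_alt (numbers : List Int) (k : Int) : Bool :=
  if numbers = [] ∨ k < 0 ∨ (numbers.length : Int) ≤ k then false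
  else
    match PySem.List.pyGet? numbers k with
    | none => false  -- unreachable: guard ensures k is in range
    | some pivot =>
      let st := (PySem.List.enumerate numbers 0).foldl (daemonStep pivot k) (true, false)
      st.1 || st.2

-- ===== PRECONDITION & SPEC =====
def Spec_daemon (numbers : List Int) (k : Int) (out : Bool) : Prop := out = daemon_alt numbers k
instance (numbers : List Int) (k : Int) (out : Bool) : Decidable (Spec_daemon numbers k out) := by unfold Spec_daemon; infer_instance

-- ===== CLAIM (what is proved, stated in full; the proofs are below) =====
def Claim_equal_daemon : Prop := ∀ (numbers : List Int) (k : Int), Dom_daemon numbers k → Spec_daemon numbers k (daemon numbers k)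

-- ===== LEMMAS AND PROOFS =====

-- B's fold computes the two flags independently: an all-equal conjunction and an existence test
lemma fold_daemonStep (pivot k : Int) :
    ∀ (xs : List Int) (s : Int) (a b : Bool),
      (PySem.List.enumerate xs s).foldl (daemonStep pivot k) (a, b)
        = (a && xs.all (fun x => x == pivot),
           b || (PySem.List.enumerate xs s).any
                  (fun p => decide (p.1 < k) && decide (p.2 < pivot))) := by
  intro xs
  induction xs with
  | nil => intro s a b; simp [PySem.List.enumerate_nil]
  | cons x t ih =>
    intro s a b
    rw [PySem.List.enumerate_cons]
    simp only [List.foldl_cons, List.any_cons]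
    rw [show daemonStep pivot k (a, b) (s, x) =
        ((a && (x == pivot)), (b || (decide (s < k) && decide (x < pivot)))) from ?_, ih]
    · simp [Bool.and_assoc, Bool.or_assoc]
    · unfold daemonStep
      by_cases h1 : x = pivot <;> by_cases h2 : s < k ∧ x < pivot <;>
        simp [h1, h2]

-- the suffix min over elements strictly above the pivot is always ≥ pivot
lemma min_side (pivot : Int) (l : List Int) :
    pivot ≤ (PySem.List.min? (l.filter (fun x => decide (pivot < x))) (fun y => y)).getD pivot := by
  cases hm : PySem.List.min? (l.filter (fun x => decide (pivot < x))) (fun y => y) with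
  | none => simp
  | some m =>
    have hmem := PySem.List.min?_mem hm
    have := List.of_mem_filter hmem
    simp at this ⊢
    omega

-- the prefix max over elements strictly below the pivot is < pivot iff some such element exists
lemma max_side (pivot : Int) (l : List Int) :
    decide ((PySem.List.max? (l.filter (fun x => decide (x < pivot))) (fun y => y)).getD pivot < pivot)
      = !(l.filter (fun x => decide (x < pivot))).isEmpty := by
  cases hm : PySem.List.max? (l.filter (fun x => decide (x < pivot))) (fun y => y) with
  | none =>
    rw [PySem.List.max?_eq_none_iff] at hm
    simp [hm]
  | some m =>
    have hmem := PySem.List.max?_mem hm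
    have hlt := List.of_mem_filter hmem
    have hne : (l.filter (fun x => decide (x < pivot))) ≠ [] := by
      intro h; rw [h] at hmem; exact absurd hmem (List.not_mem_nil)
    simp at hlt
    simp [hlt, hne]

-- the existence test over the enumerated list coincides with nonemptiness of A's filtered prefix
lemma any_eq_filter_nonempty (numbers : List Int) (k pivot : Int) (hk : 0 ≤ k) :
    (PySem.List.enumerate numbers 0).any (fun p => decide (p.1 < k) && decide (p.2 < pivot))
      = !((numbers.take k.toNat).filter (fun x => decide (x < pivot))).isEmpty := by
  rw [Bool.eq_iff_iff]
  simp only [List.any_eq_true, Bool.and_eq_true, decide_eq_true_eq, Bool.not_eq_true',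
    List.isEmpty_eq_false_iff, ne_eq]
  constructor
  · rintro ⟨p, hp, hpk, hplt⟩
    rw [PySem.List.mem_enumerate_iff] at hp
    obtain ⟨j, hj, rfl⟩ := hp
    simp only at hpk hplt
    have hjt : j < (numbers.take k.toNat).length := by
      simp only [List.length_take]
      omega
    intro hnil
    have hmem : numbers[j] ∈ (numbers.take k.toNat).filter (fun x => decide (x < pivot)) := by
      rw [List.mem_filter]
      refine ⟨?_, by simpa using hplt⟩
      have := List.getElem_mem hjt
      simpa [List.getElem_take] using this
    rw [hnil] at hmem
    exact absurd hmem (List.not_mem_nil)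
  · intro hne
    obtain ⟨x, hx⟩ := List.exists_mem_of_ne_nil _ hne
    rw [List.mem_filter] at hx
    obtain ⟨hxtake, hxlt⟩ := hx
    obtain ⟨j, hj, hxj⟩ := List.getElem_of_mem hxtake
    simp only [List.length_take] at hj
    refine ⟨((j:Int), x), ?_, by omega, by simpa using hxlt⟩
    rw [PySem.List.mem_enumerate_iff]
    exact ⟨j, by omega, by simp [← hxj, List.getElem_take]⟩

-- ===== VERDICT (by name: the statement is the Claim_ definition above) =====
theorem daemon_spec : Claim_equal_daemon := by
  intro numbers k _
  unfold Spec_daemon daemon daemon_alt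
  by_cases hg : numbers = [] ∨ k < 0 ∨ (numbers.length : Int) ≤ k
  · simp [hg]
  · simp only [hg, if_false]
    push Not at hg
    obtain ⟨hne, hk0, hklen⟩ := hg
    cases hp : PySem.List.pyGet? numbers k with
    | none => rfl
    | some pivot =>
      dsimp only
      rw [fold_daemonStep]
      simp only [Bool.true_and, Bool.false_or]
      by_cases hall : numbers.all (fun x => x == pivot) = true
      · simp [hall]
      · simp only [hall, Bool.false_or]
        rw [min_side pivot _ |> decide_eq_true, Bool.and_true, max_side,
            PySem.List.slice_to numbers hk0, any_eq_filter_nonempty numbers k pivot hk0]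
        simp
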